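-- pv_equiv track=rewrite | github.com/dloscutoff/ascii-piet | ascii2piet.py | decode_newlines
-- ===== SOURCE A (Python) =====
-- NO_EOL_MASK = 0b100000
--
-- def decode_newlines(ascii_piet):
--     "Decode the end-of-line bit into actual newlines."
--     piet_with_newlines = ""
--     for char in ascii_piet:
--         if char == "\n":
--             # There shouldn't be any newlines in the encoded version
--             # before this function adds them
--             continue
--         charcode = ord(char)
--         if charcode & NO_EOL_MASK:
--             # A codel that is not at end of line gets passed through
--             # unchanged
--             piet_with_newlines += char
--         else:
--             # A codel that is at end of line gets turned into its
--             # no-EOL equivalent and a newline appended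
--             piet_with_newlines += chr(charcode | NO_EOL_MASK) + "\n"
--     # Return the new code with trailing newlines removed
--     return piet_with_newlines.rstrip("\n")
-- ===== SOURCE B (Python) =====
-- NO_EOL_MASK = 0b100000
--
--
-- def decode_newlines(ascii_piet):
--     "Decode the end-of-line bit into actual newlines."
--     # Scan right-to-left with a seen-output flag: a trailing run of end-of-line
--     # codels emits no newlines (nothing comes after them), so no rstrip is
--     # needed; the output is built back-to-front and reversed once at the end.
--     out = []
--     started = False
--     for char in reversed(ascii_piet):
--         if char == "\n":
--             continue
--         code = ord(char)
--         if not code & NO_EOL_MASK: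
--             if started:
--                 out.append("\n")
--             out.append(chr(code | NO_EOL_MASK))
--         else:
--             out.append(char)
--         started = True
--     out.reverse()
--     return "".join(out)
-- ===== Notes on version B (the rewrite author's own statement) =====
-- stated objective: alternative
-- what changed: B scans the string right-to-left with a seen-output flag, so a newline for an end-of-line codel is only emitted once some later output exists - trailing newlines never arise and rstrip disappears; the output is built back-to-front and reversed once.
import Mathlib
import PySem

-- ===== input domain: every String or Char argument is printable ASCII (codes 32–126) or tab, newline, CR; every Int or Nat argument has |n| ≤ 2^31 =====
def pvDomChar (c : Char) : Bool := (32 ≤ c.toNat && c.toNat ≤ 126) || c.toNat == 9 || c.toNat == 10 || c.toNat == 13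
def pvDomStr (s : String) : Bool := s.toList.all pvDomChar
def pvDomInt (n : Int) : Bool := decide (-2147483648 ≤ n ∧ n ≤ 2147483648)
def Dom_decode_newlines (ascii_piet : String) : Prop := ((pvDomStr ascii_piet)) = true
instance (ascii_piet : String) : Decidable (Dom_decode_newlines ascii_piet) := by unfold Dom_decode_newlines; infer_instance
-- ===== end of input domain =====

-- B scans the string right-to-left with a 'started' flag, so trailing newlines are never
-- emitted and rstrip disappears; the output is built back-to-front and reversed once.
-- Objective: alternative decomposition (same O(n) cost).


-- ===== PORT A =====
-- NO_EOL_MASK = 0b100000 = 32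
-- one iteration of A's loop ('+=' on the accumulated string, done over List Char)
def pvStepA (acc : List Char) (c : Char) : List Char :=
  if c = '\n' then acc
  else if c.toNat &&& 32 ≠ 0 then acc ++ [c]
  else acc ++ [Char.ofNat (c.toNat ||| 32), '\n']

def decode_newlines (ascii_piet : String) : String :=
  let piet_with_newlines := ascii_piet.toList.foldl pvStepA []
  -- hand port of str.rstrip("\n") (PySem has no rstrip-with-chars): drop the trailing '\n'
  -- characters; exact because rstrip("\n") removes exactly the maximal trailing run of '\n'
  String.ofList ((piet_with_newlines.reverse.dropWhile (· = '\n')).reverse)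

-- ===== PORT B =====
-- one iteration of B's right-to-left loop; state = (out list built in append order, started flag)
def pvStepB (st : List Char × Bool) (c : Char) : List Char × Bool :=
  if c = '\n' then st
  else if c.toNat &&& 32 = 0 then
    ((if st.2 then st.1 ++ ['\n'] else st.1) ++ [Char.ofNat (c.toNat ||| 32)], true)
  else (st.1 ++ [c], true)

def decode_newlines_alt (ascii_piet : String) : String :=
  let st := ascii_piet.toList.reverse.foldl pvStepB ([], false)
  String.ofList st.1.reverse

-- ===== PRECONDITION & SPEC =====
def Spec_decode_newlines (ascii_piet : String) (out : String) : Prop := out = decode_newlines_alt ascii_piet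
instance (ascii_piet : String) (out : String) : Decidable (Spec_decode_newlines ascii_piet out) := by unfold Spec_decode_newlines; infer_instance

-- ===== CLAIM (what is proved, stated in full; the proofs are below) =====
def Claim_equal_decode_newlines : Prop := ∀ (ascii_piet : String), Dom_decode_newlines ascii_piet → Spec_decode_newlines ascii_piet (decode_newlines ascii_piet)

-- ===== LEMMAS AND PROOFS =====

theorem tb32 (j : Nat) : (32:Nat).testBit j = decide (j = 5) := by
  have h : (32:Nat) = 2^5 := by norm_num
  rw [h, Nat.testBit_two_pow]; simp [eq_comm]

theorem or32_ne_ten (n : Nat) : n ||| 32 ≠ 10 := by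
  intro h
  have h2 := congrArg (fun m => m.testBit 5) h
  simp [Nat.testBit_or, tb32] at h2
  exact absurd h2 (by decide)

theorem chr_ne_nl (n : Nat) (h : n ≠ 10) : Char.ofNat n ≠ '\n' := by
  intro he
  have h2 := congrArg Char.toNat he
  rw [Char.toNat_ofNat] at h2
  have h10 : ('\n').toNat = 10 := by decide
  rw [h10] at h2
  split at h2 <;> omega

-- per-character output of A's loop
def pvG (c : Char) : List Char :=
  if c = '\n' then []
  else if c.toNat &&& 32 ≠ 0 then [c]
  else [Char.ofNat (c.toNat ||| 32), '\n']

-- A's rstrip("\n")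
def pvR (xs : List Char) : List Char := (xs.reverse.dropWhile (· = '\n')).reverse

theorem foldA_flat (l : List Char) : ∀ acc, l.foldl pvStepA acc = acc ++ l.flatMap pvG := by
  induction l with
  | nil => intro acc; simp
  | cons c t ih =>
    intro acc
    simp only [List.foldl_cons, List.flatMap_cons, ih]
    have : pvStepA acc c = acc ++ pvG c := by
      unfold pvStepA pvG; split_ifs <;> simp
    rw [this, List.append_assoc]

theorem flat_nil_of_all_nl (t : List Char) (h : t.any (· ≠ '\n') = false) :
    t.flatMap pvG = [] := by
  induction t with
  | nil => rfl
  | cons c r ih =>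
    simp only [List.any_cons, Bool.or_eq_false_iff] at h
    have hc : c = '\n' := by simpa using h.1
    simp [pvG, hc, ih h.2]

theorem flat_has_non_nl (t : List Char) (h : t.any (· ≠ '\n') = true) :
    ∃ c ∈ t.flatMap pvG, c ≠ '\n' := by
  induction t with
  | nil => simp at h
  | cons c r ih =>
    simp only [List.any_cons, Bool.or_eq_true] at h
    rcases h with h | h
    · have hc : c ≠ '\n' := by simpa using h
      refine ⟨?_, ?_, ?_⟩
      · exact if c.toNat &&& 32 ≠ 0 then c else Char.ofNat (c.toNat ||| 32)
      · simp only [List.flatMap_cons, List.mem_append]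
        left
        unfold pvG
        split_ifs with h1 h2 <;> simp_all
      · split_ifs with h2
        · exact hc
        · exact chr_ne_nl _ (or32_ne_ten _)
    · obtain ⟨x, hx, hxn⟩ := ih h
      exact ⟨x, by simp [List.flatMap_cons, hx], hxn⟩

theorem pvR_append (ys xs : List Char) (h : ∃ c ∈ xs, c ≠ '\n') :
    pvR (ys ++ xs) = ys ++ pvR xs := by
  unfold pvR
  rw [List.reverse_append, List.dropWhile_append]
  have hne : (xs.reverse.dropWhile (· = '\n')).isEmpty = false := by
    obtain ⟨c, hc, hcn⟩ := h
    rw [List.isEmpty_eq_false_iff]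
    intro hemp
    have := List.dropWhile_eq_nil_iff.mp hemp c (by simpa using hc)
    simp at this
    exact hcn this
  rw [hne]
  simp

-- main invariant of B's right-to-left fold
theorem foldB_inv (l : List Char) :
    l.reverse.foldl pvStepB ([], false) = ((pvR (l.flatMap pvG)).reverse, l.any (· ≠ '\n')) := by
  induction l with
  | nil => rfl
  | cons c t ih =>
    rw [List.reverse_cons, List.foldl_append, ih]
    simp only [List.foldl_cons, List.foldl_nil, List.flatMap_cons, List.any_cons]
    by_cases hc : c = '\n'
    · simp [pvStepB, pvG, hc]
    · have hgc : pvG c = if c.toNat &&& 32 ≠ 0 then [c] else [Char.ofNat (c.toNat ||| 32), '\n'] := by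
        simp [pvG, hc]
      cases hany : t.any (· ≠ '\n') with
      | false =>
        have hflat := flat_nil_of_all_nl t hany
        rw [hflat, List.append_nil, hgc]
        by_cases hb : c.toNat &&& 32 = 0
        · have hnl := chr_ne_nl _ (or32_ne_ten c.toNat)
          simp [pvStepB, hc, hb, pvR, List.dropWhile, hnl]
        · simp [pvStepB, hc, hb, pvR]
      | true =>
        have hx := flat_has_non_nl t hany
        rw [hgc]
        by_cases hb : c.toNat &&& 32 = 0
        · rw [if_neg (by simpa using hb),
            pvR_append [Char.ofNat (c.toNat ||| 32), '\n'] _ hx]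
          simp [pvStepB, hc, hb]
        · rw [if_pos hb, pvR_append [c] _ hx]
          simp [pvStepB, hc, hb]

-- ===== VERDICT (by name: the statement is the Claim_ definition above) =====
theorem decode_newlines_spec : Claim_equal_decode_newlines := by
  intro s _
  show decode_newlines s = decode_newlines_alt s
  unfold decode_newlines decode_newlines_alt
  dsimp only
  rw [foldA_flat s.toList [], List.nil_append, foldB_inv s.toList]
  simp [pvR]
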